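-- pv_equiv track=rewrite | github.com/Kassaresi/pp2--22B030477- | TSIS3/function1.py | spy_game
-- ===== SOURCE A (Python) =====
-- def spy_game(list):
--     che = True
--     for i in range(len(list)):
--         if list[i] == 7:
--             che = True
--         elif list[i] == 0:
--             che = False
--     return che
-- ===== SOURCE B (Python) =====
-- def spy_game(list):
--     significant = [x for x in list if x == 7 or x == 0]
--     if not significant:
--         return True
--     return significant[-1] == 7
-- ===== Notes on version B (the rewrite author's own statement) =====
-- stated objective: simpler
-- what changed: Replaces the forward scan with a running flag by filtering to the 0/7 elements and inspecting only the last one (True if none).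
import Mathlib
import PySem

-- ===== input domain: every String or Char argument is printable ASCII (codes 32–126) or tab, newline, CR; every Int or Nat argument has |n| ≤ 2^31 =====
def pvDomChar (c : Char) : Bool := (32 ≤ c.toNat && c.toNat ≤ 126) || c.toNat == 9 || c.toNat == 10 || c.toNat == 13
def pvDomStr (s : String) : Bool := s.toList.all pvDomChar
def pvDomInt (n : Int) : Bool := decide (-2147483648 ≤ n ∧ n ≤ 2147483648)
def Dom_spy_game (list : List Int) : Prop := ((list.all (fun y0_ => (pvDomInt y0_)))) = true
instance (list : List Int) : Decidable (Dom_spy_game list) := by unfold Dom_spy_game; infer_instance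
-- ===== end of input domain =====

-- B filters to the 0/7 elements and inspects only the last one instead of keeping a flag across the whole scan; objective: simpler.

-- ===== PORT A =====
def spy_game (list : List Int) : Bool :=
  (PySem.List.pyRange 0 (list.length : Int) 1).foldl
    (fun che i =>
      if PySem.List.pyGetD list i 0 == 7 then true
      else if PySem.List.pyGetD list i 0 == 0 then false
      else che) true

-- ===== PORT B =====
def spy_game_alt (list : List Int) : Bool :=
  let significant := list.filter (fun x => x == 7 || x == 0)
  if significant.isEmpty then true
  else PySem.List.pyGetD significant (-1) 0 == 7

-- ===== PRECONDITION & SPEC =====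
def Spec_spy_game (list : List Int) (out : Bool) : Prop := out = spy_game_alt list
instance (list : List Int) (out : Bool) : Decidable (Spec_spy_game list out) := by unfold Spec_spy_game; infer_instance

-- ===== CLAIM (what is proved, stated in full; the proofs are below) =====
def Claim_equal_spy_game : Prop := ∀ (list : List Int), Dom_spy_game list → Spec_spy_game list (spy_game list)

-- ===== LEMMAS AND PROOFS =====
theorem spy_game_flag_eq_last (l : List Int) (che : Bool) :
    l.foldl (fun che x => if x == 7 then true else if x == 0 then false else che) che
      = (match (l.filter (fun x => x == 7 || x == 0)).getLast? with
         | none => che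
         | some x => x == 7) := by
  induction l generalizing che with
  | nil => simp
  | cons a t ih =>
    simp only [List.foldl_cons, List.filter_cons]
    by_cases h7 : a = 7
    · subst h7
      rw [if_pos (by decide), ih]
      cases hft : t.filter (fun x => x == 7 || x == 0) with
      | nil => simp
      | cons b bs =>
        rw [if_pos (by decide), List.getLast?_cons_cons,
            List.getLast?_eq_some_getLast (l := b :: bs) (by simp)]
    · by_cases h0 : a = 0
      · subst h0
        rw [if_neg (by decide), if_pos (by decide), ih]
        cases hft : t.filter (fun x => x == 7 || x == 0) with
        | nil => simp
        | cons b bs =>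
        rw [if_pos (by decide), List.getLast?_cons_cons,
            List.getLast?_eq_some_getLast (l := b :: bs) (by simp)]
      · have : ((a == 7 || a == 0) : Bool) = false := by simp [h7, h0]
        rw [this, if_neg (by simp [h7]), if_neg (by simp [h0]), ih]
        simp

-- ===== VERDICT (by name: the statement is the Claim_ definition above) =====
theorem spy_game_spec : Claim_equal_spy_game := by
  intro l _
  unfold Spec_spy_game spy_game spy_game_alt
  rw [PySem.List.foldl_pyRange_zero_pyGetD'
        (f := fun che x => if x == 7 then true else if x == 0 then false else che)]
  rw [spy_game_flag_eq_last]
  cases hf : l.filter (fun x => x == 7 || x == 0) with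
  | nil => simp
  | cons a t =>
    have hne : a :: t ≠ [] := by simp
    simp only [List.isEmpty_cons, Bool.false_eq_true, if_false]
    rw [List.getLast?_eq_some_getLast hne]
    simp [PySem.List.pyGetD, PySem.List.pyGet?, PySem.List.pyIdx?,
          List.getLast_eq_getElem]
    exact Iff.rfl
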